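-- pv_equiv track=rewrite | github.com/adamwangdata/adamwangdata.github.io | supplemental/python/p35.py | get_circular_primes
-- ===== SOURCE A (Python) =====
-- def get_rotations(n):
--     """Return all unique rotations of n."""
--     rotations = []
--     for i in range(len(str(n))):
--         n = rotate(n)
--         rotations.append(int(n))
--     return list(set(rotations))
--
-- def rotate(n):
--     """Rotate the digits an integer clockwise. """
--     n = str(n)
--     if len(n) == 1:
--         return n
--     else:
--         return n[1:] + n[0]
--
-- def get_circular_primes(primes):
--     """Return list of circular primes given a list or array of primes."""
--     primes_set = set(primes)  # For fast membership lookup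
--     circular_primes = []
--     for prime in primes:
--         # Append if prime is a circular prime.
--         rotations = get_rotations(prime)
--         for r in rotations:
--             if r not in primes_set:
--                 break
--         else:
--             circular_primes.append(prime)
--     return circular_primes
-- ===== SOURCE B (Python) =====
-- def get_circular_primes(primes):
--     """Return list of circular primes given a list or array of primes."""
--     primes_set = set(primes)  # For fast membership lookup
--     cache = {}  # canonical rotation-string of the class -> class verdict
--     circular_primes = []
--     for prime in primes:
--         s = str(prime)
--         rotation_strings = [s[i:] + s[:i] for i in range(len(s))]
--         key = min(rotation_strings)  # canonical representative of the rotation class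
--         if key not in cache:
--             cache[key] = all(int(r) in primes_set for r in rotation_strings)
--         if cache[key]:
--             circular_primes.append(prime)
--     return circular_primes
-- ===== Notes on version B (the rewrite author's own statement) =====
-- stated objective: alternative
-- what changed: B replaces A's independent per-prime rotate-loop + set-dedup test by building the rotation strings with slices in one comprehension, canonicalising each rotation class by its minimal rotation string, and caching one verdict per class in a dict so the membership test runs once per rotation class instead of once per prime.
import Mathlib
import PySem

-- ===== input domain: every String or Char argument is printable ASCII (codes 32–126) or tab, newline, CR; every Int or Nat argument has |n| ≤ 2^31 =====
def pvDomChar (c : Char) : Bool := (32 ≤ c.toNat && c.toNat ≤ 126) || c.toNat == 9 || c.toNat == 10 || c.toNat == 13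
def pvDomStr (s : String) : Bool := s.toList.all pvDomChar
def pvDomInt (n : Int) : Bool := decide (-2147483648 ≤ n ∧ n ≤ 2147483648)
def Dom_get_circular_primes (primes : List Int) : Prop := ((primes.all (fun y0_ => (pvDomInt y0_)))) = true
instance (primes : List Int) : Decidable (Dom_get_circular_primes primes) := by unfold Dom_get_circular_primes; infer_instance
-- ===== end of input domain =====

-- B caches one primality-of-the-whole-rotation-class verdict per class (keyed by the minimal
-- rotation string) instead of re-testing every rotation for every prime; same return value.


-- ===== PORT A =====

-- rotate(n): n[1:] + n[0] on the digit string (identity for a single character).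
-- n[0] cannot raise here because str(n) is never empty; the none branch is unreachable.
def pyRotate (s : List Char) : List Char :=
  if PySem.List.len s == 1 then s
  else
    PySem.List.slice s (some 1) none ++
      (match PySem.List.pyGet? s 0 with
       | some c => [c]
       | none => [])

-- get_rotations(n): rotate len(str(n)) times, collecting int(n); list(set(...)) at the end.
-- int(...) raises ValueError for negative n (rotated '-'); those inputs are outside Pre_.
def get_rotations (n : Int) : List Int :=
  let s0 := PySem.Int.toChars n
  let st := (PySem.List.pyRange 0 (PySem.List.len s0) 1).foldl
      (fun (st : List Char × List Int) _ =>
        let s := pyRotate st.1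
        (s, st.2 ++ [(PySem.Int.ofChars? s).getD 0]))
      (s0, [])
  PySem.Set.ofList st.2

def get_circular_primes (primes : List Int) : List Int :=
  let primes_set := PySem.Set.ofList primes
  primes.foldl
    (fun circular_primes prime =>
      let rotations := get_rotations prime
      -- the for/r-in-rotations loop with break/else: ok stays true iff no rotation is missing
      let ok := rotations.foldl
        (fun ok r => if PySem.Set.contains primes_set r then ok else false) true
      if ok then circular_primes ++ [prime] else circular_primes)
    []

-- ===== PORT B =====

def get_circular_primes_alt (primes : List Int) : List Int :=
  let primes_set := PySem.Set.ofList primes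
  let st := primes.foldl
      (fun (st : PySem.Dict (List Char) Bool × List Int) prime =>
        let s := PySem.Int.toChars prime
        let rotation_strings := (PySem.List.pyRange 0 (PySem.List.len s) 1).map
            (fun i => PySem.List.slice s (some i) none ++ PySem.List.slice s none (some i))
        -- min(rotation_strings): the list is nonempty (str(n) is never empty)
        let key := (PySem.List.min? rotation_strings id).getD []
        let cache :=
          if st.1.contains key then st.1
          else st.1.insert key (rotation_strings.all
            (fun r => PySem.Set.contains primes_set ((PySem.Int.ofChars? r).getD 0)))
        (cache, if cache.getD key false then st.2 ++ [prime] else st.2))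
      (PySem.Dict.empty, [])
  st.2

-- ===== PRECONDITION & SPEC =====
-- Python A raises ValueError (int() of a rotated string containing '-') on any negative
-- element; Pre_ excludes exactly those inputs.
def Pre_get_circular_primes (primes : List Int) : Prop := ∀ p ∈ primes, 0 ≤ p
instance (primes : List Int) : Decidable (Pre_get_circular_primes primes) := by
  unfold Pre_get_circular_primes; infer_instance

def pvWitness_get_circular_primes : List Int := [2, 3, 5, 7, 13, 17, 31, 37]

def Spec_get_circular_primes (primes : List Int) (out : List Int) : Prop := out = get_circular_primes_alt primes
instance (primes : List Int) (out : List Int) : Decidable (Spec_get_circular_primes primes out) := by unfold Spec_get_circular_primes; infer_instance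

-- ===== CLAIM (what is proved, stated in full; the proofs are below) =====
def Claim_equal_get_circular_primes : Prop := ∀ (primes : List Int), Dom_get_circular_primes primes → Pre_get_circular_primes primes → Spec_get_circular_primes primes (get_circular_primes primes)

-- ===== LEMMAS AND PROOFS =====

-- the list of all rotations of a digit string, the shared yardstick of both ports
def rotList (s : List Char) : List (List Char) := (List.range s.length).map s.rotate

def valOf (r : List Char) : Int := (PySem.Int.ofChars? r).getD 0

-- "every rotation of s, read as an int, is in the set of primes"
def verdictOf (primes : List Int) (s : List Char) : Bool :=
  (rotList s).all (fun r => PySem.Set.contains (PySem.Set.ofList primes) (valOf r))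

def minRot (s : List Char) : List Char := (PySem.List.min? (rotList s) id).getD []

-- B's loop body, written out (definitionally equal to the lambda in the port)
def rotsB (s : List Char) : List (List Char) :=
  (PySem.List.pyRange 0 (PySem.List.len s) 1).map
    (fun i => PySem.List.slice s (some i) none ++ PySem.List.slice s none (some i))

def keyB (s : List Char) : List Char := (PySem.List.min? (rotsB s) id).getD []

def stepB (primes : List Int) (st : PySem.Dict (List Char) Bool × List Int) (prime : Int) :
    PySem.Dict (List Char) Bool × List Int :=
  let s := PySem.Int.toChars prime
  let key := keyB s
  let cache :=
    if st.1.contains key then st.1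
    else st.1.insert key ((rotsB s).all
      (fun r => PySem.Set.contains (PySem.Set.ofList primes) ((PySem.Int.ofChars? r).getD 0)))
  (cache, if cache.getD key false then st.2 ++ [prime] else st.2)

theorem pyRotate_eq (t : List Char) : pyRotate t = t.rotate 1 := by
  unfold pyRotate
  match t with
  | [] => simp [PySem.List.len, PySem.List.slice, PySem.List.pyGet?]
  | [c] => simp [PySem.List.len]
  | a :: b :: r =>
    rw [if_neg (by simp [PySem.List.len_eq]; omega)]
    rw [PySem.List.slice_from_one, PySem.List.pyGet?_zero_cons]
    rw [List.rotate_eq_drop_append_take (by simp)]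
    simp

theorem foldA (l : List Int) (t : List Char) (acc : List Int) :
    l.foldl
      (fun (st : List Char × List Int) _ =>
        (pyRotate st.1, st.2 ++ [(PySem.Int.ofChars? (pyRotate st.1)).getD 0]))
      (t, acc)
    = (t.rotate l.length,
       acc ++ (List.range l.length).map (fun j => valOf (t.rotate (j + 1)))) := by
  induction l generalizing t acc with
  | nil => simp
  | cons a l ih =>
    simp only [List.foldl_cons]
    rw [pyRotate_eq t, ih]
    rw [List.rotate_rotate]
    refine Prod.ext ?_ ?_
    · show t.rotate (1 + l.length) = t.rotate (a :: l).length
      congr 1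
      simp; omega
    · show (acc ++ [(PySem.Int.ofChars? (t.rotate 1)).getD 0]) ++
        (List.range l.length).map (fun j => valOf ((t.rotate 1).rotate (j + 1)))
        = acc ++ (List.range (a :: l).length).map (fun j => valOf (t.rotate (j + 1)))
      rw [List.append_assoc, List.singleton_append, List.length_cons,
        List.range_succ_eq_map, List.map_cons, List.map_map]
      refine congrArg (acc ++ ·) (congrArg₂ (· :: ·) ?_ ?_)
      · simp [valOf]
      · apply List.map_congr_left
        intro j hj
        simp only [Function.comp_apply, List.rotate_rotate, valOf]
        have h11 : 1 + (j + 1) = j + 1 + 1 := by omega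
        rw [h11]

theorem get_rotations_eq (n : Int) :
    get_rotations n = PySem.Set.ofList
      ((List.range (PySem.Int.toChars n).length).map
        (fun j => valOf ((PySem.Int.toChars n).rotate (j + 1)))) := by
  simp only [get_rotations, PySem.List.len_eq]
  rw [foldA]
  simp [PySem.List.length_pyRange_one]

theorem shift_iff (s : List Char) (P : List Char → Prop) :
    (∀ j < s.length, P (s.rotate (j + 1))) ↔ (∀ j < s.length, P (s.rotate j)) := by
  constructor
  · intro h j hj
    rcases Nat.eq_zero_or_pos j with hz | hp
    · subst hz
      have := h (s.length - 1) (by omega)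
      rwa [show s.length - 1 + 1 = s.length by omega, List.rotate_length, ← List.rotate_zero s] at this
    · have := h (j - 1) (by omega)
      rwa [show j - 1 + 1 = j by omega] at this
  · intro h j hj
    have hd : 0 < s.length := by omega
    have := h ((j + 1) % s.length) (Nat.mod_lt _ hd)
    rwa [List.rotate_mod] at this

theorem allA_eq (ps : List Int) (s : List Char) :
    (PySem.Set.ofList ((List.range s.length).map (fun j => valOf (s.rotate (j + 1))))).all
        (fun r => PySem.Set.contains (PySem.Set.ofList ps) r)
      = (rotList s).all (fun r => PySem.Set.contains (PySem.Set.ofList ps) (valOf r)) := by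
  rw [Bool.eq_iff_iff]
  simp only [List.all_eq_true, rotList]
  constructor
  · intro h
    simp only [List.mem_map, List.mem_range, forall_exists_index, and_imp]
    rintro r j hj rfl
    exact (shift_iff s (fun t => PySem.Set.contains (PySem.Set.ofList ps) (valOf t) = true)).mp
      (fun j hj => h _ ((PySem.Set.mem_ofList _ _).mpr (List.mem_map.mpr ⟨j, List.mem_range.mpr hj, rfl⟩))) j hj
  · intro h r hr
    have hr' := (PySem.Set.mem_ofList _ _).mp hr
    obtain ⟨j, hj, rfl⟩ := List.mem_map.mp hr'
    have hj' := List.mem_range.mp hj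
    exact (shift_iff s (fun t => PySem.Set.contains (PySem.Set.ofList ps) (valOf t) = true)).mpr
      (fun j hj => h _ (List.mem_map.mpr ⟨j, List.mem_range.mpr hj, rfl⟩)) j hj'

theorem foldl_flag (l : List Int) (c : Int → Bool) (b : Bool) :
    l.foldl (fun ok r => if c r then ok else false) b = (b && l.all c) := by
  induction l generalizing b with
  | nil => simp
  | cons a l ih =>
    rw [List.foldl_cons, ih]
    cases h : c a <;> simp [h]

theorem A_eq_filter (primes : List Int) :
    get_circular_primes primes
      = primes.filter (fun p => verdictOf primes (PySem.Int.toChars p)) := by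
  simp only [get_circular_primes, get_rotations_eq, foldl_flag, Bool.true_and, allA_eq]
  simp only [verdictOf]
  rw [PySem.List.foldl_append_if_eq_filter]
  simp

theorem rotsB_eq (s : List Char) : rotsB s = rotList s := by
  rw [rotsB, PySem.List.len_eq, PySem.List.pyRange_one, List.map_map]
  simp only [Int.sub_zero, Int.toNat_natCast, rotList]
  apply List.map_congr_left
  intro k hk
  simp only [Function.comp_apply, Int.zero_add]
  rw [PySem.List.slice_from_natCast, PySem.List.slice_to_natCast,
    List.rotate_eq_drop_append_take (Nat.le_of_lt (List.mem_range.mp hk))]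

theorem mem_rotList_of_isRotated {s x : List Char} (h : s ≠ []) (hr : s.IsRotated x) :
    x ∈ rotList s := by
  obtain ⟨n, rfl⟩ := hr
  rw [← List.rotate_mod]
  exact List.mem_map.mpr ⟨n % s.length, List.mem_range.mpr
    (Nat.mod_lt _ (List.length_pos_iff.mpr h)), rfl⟩

theorem isRotated_of_mem_rotList {s x : List Char} (h : x ∈ rotList s) : s.IsRotated x := by
  obtain ⟨j, _, rfl⟩ := List.mem_map.mp h
  exact ⟨j, rfl⟩

theorem minRot_mem {s : List Char} (h : s ≠ []) : minRot s ∈ rotList s := by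
  unfold minRot
  cases hm : PySem.List.min? (rotList s) id with
  | none =>
    exfalso
    have : rotList s = [] := (PySem.List.min?_eq_none_iff _ _).mp hm
    simp [rotList, List.range_eq_nil, h] at this
  | some m => simpa using PySem.List.min?_mem hm

-- equal canonical keys ⇒ equal rotation classes (as sets)
theorem rotList_mem_iff_of_minRot_eq {s q : List Char} (h : minRot s = minRot q) :
    ∀ x, x ∈ rotList s ↔ x ∈ rotList q := by
  have hlen : ∀ (t x : List Char), x ∈ rotList t → x.length = t.length := by
    rintro t x hx
    obtain ⟨j, _, rfl⟩ := List.mem_map.mp hx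
    exact List.length_rotate ..
  have hnil : minRot ([] : List Char) = [] := by
    have : rotList ([] : List Char) = [] := by simp [rotList]
    simp [minRot, this, (PySem.List.min?_eq_none_iff ([] : List (List Char)) id).mpr rfl]
  have hkey : ∀ t : List Char, t ≠ [] → minRot t ≠ [] := by
    intro t ht hcon
    have := hlen t _ (minRot_mem ht)
    rw [hcon] at this
    exact ht (List.length_eq_zero_iff.mp this.symm)
  by_cases hs : s = []
  · subst hs
    by_cases hq : q = []
    · subst hq; intro x; rfl
    · exact absurd (h ▸ hnil) (hkey q hq)
  · by_cases hq : q = []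
    · subst hq; exact absurd (h.symm ▸ hnil) (hkey s hs)
    · have hms : s.IsRotated (minRot s) := isRotated_of_mem_rotList (minRot_mem hs)
      have hmq : q.IsRotated (minRot s) := h ▸ isRotated_of_mem_rotList (minRot_mem hq)
      have hsq : s.IsRotated q := hms.trans hmq.symm
      intro x
      constructor
      · intro hx
        exact mem_rotList_of_isRotated hq (hsq.symm.trans (isRotated_of_mem_rotList hx))
      · intro hx
        exact mem_rotList_of_isRotated hs (hsq.trans (isRotated_of_mem_rotList hx))

theorem verdict_eq_of_minRot_eq (ps : List Int) {s q : List Char}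
    (h : minRot s = minRot q) : verdictOf ps s = verdictOf ps q := by
  rw [Bool.eq_iff_iff]
  simp only [verdictOf, List.all_eq_true]
  constructor
  · intro hall r hr
    exact hall r ((rotList_mem_iff_of_minRot_eq h r).mpr hr)
  · intro hall r hr
    exact hall r ((rotList_mem_iff_of_minRot_eq h r).mp hr)

-- the cache only ever stores the class verdict of the key's class
def CacheInv (primes : List Int) (cache : PySem.Dict (List Char) Bool) : Prop :=
  ∀ k b, cache.get? k = some b → ∀ q : List Char, minRot q = k → verdictOf primes q = b

theorem CacheInv_insert (primes : List Int) (cache : PySem.Dict (List Char) Bool)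
    (s : List Char) (hInv : CacheInv primes cache) :
    CacheInv primes (cache.insert (minRot s) (verdictOf primes s)) := by
  intro k b hget q hq
  rw [PySem.Dict.get?_insert] at hget
  by_cases hk : k = minRot s
  · rw [if_pos hk] at hget
    cases hget
    exact verdict_eq_of_minRot_eq primes (hq.trans hk)
  · rw [if_neg hk] at hget
    exact hInv k b hget q hq

theorem keyB_eq (s : List Char) : keyB s = minRot s := by
  rw [keyB, rotsB_eq]; rfl

theorem B_fold (primes l : List Int) (cache : PySem.Dict (List Char) Bool)
    (out : List Int) (hInv : CacheInv primes cache) :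
    (l.foldl (stepB primes) (cache, out)).2
    = out ++ l.filter (fun p => verdictOf primes (PySem.Int.toChars p)) := by
  induction l generalizing cache out with
  | nil => simp
  | cons prime l ih =>
    have hveq : ((rotList (PySem.Int.toChars prime)).all
        (fun r => PySem.Set.contains (PySem.Set.ofList primes) ((PySem.Int.ofChars? r).getD 0)))
        = verdictOf primes (PySem.Int.toChars prime) := by
      simp only [verdictOf, valOf]
    have hstep : stepB primes (cache, out) prime
        = (if cache.contains (minRot (PySem.Int.toChars prime)) then cache
           else cache.insert (minRot (PySem.Int.toChars prime))
             (verdictOf primes (PySem.Int.toChars prime)),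
           if verdictOf primes (PySem.Int.toChars prime) then out ++ [prime] else out) := by
      simp only [stepB, keyB_eq, rotsB_eq]
      by_cases hc : cache.contains (minRot (PySem.Int.toChars prime)) = true
      · simp only [hc, if_true]
        obtain ⟨b, hb⟩ : ∃ b, cache.get? (minRot (PySem.Int.toChars prime)) = some b := by
          have := PySem.Dict.contains_eq_isSome_get? (d := cache)
            (k := minRot (PySem.Int.toChars prime))
          rw [hc] at this
          exact Option.isSome_iff_exists.mp this.symm
        have hbd : cache.getD (minRot (PySem.Int.toChars prime)) false = b :=
          PySem.Dict.getD_of_get?_eq_some _ _ hb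
        have hv : verdictOf primes (PySem.Int.toChars prime) = b := hInv _ _ hb _ rfl
        rw [hbd, hv]
      · simp only [hc, Bool.false_eq_true, if_false]
        rw [hveq, PySem.Dict.getD_insert_self]
    rw [List.foldl_cons, hstep, List.filter_cons]
    by_cases hc : cache.contains (minRot (PySem.Int.toChars prime)) = true
    · rw [if_pos hc, ih cache _ hInv]
      cases hvv : verdictOf primes (PySem.Int.toChars prime) <;> simp
    · rw [if_neg hc, ih _ _ (CacheInv_insert primes cache (PySem.Int.toChars prime) hInv)]
      cases hvv : verdictOf primes (PySem.Int.toChars prime) <;> simp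

theorem B_eq_filter (primes : List Int) :
    get_circular_primes_alt primes
      = primes.filter (fun p => verdictOf primes (PySem.Int.toChars p)) := by
  have hempty : CacheInv primes PySem.Dict.empty := by
    intro k b hget
    rw [PySem.Dict.get?_empty] at hget
    exact absurd hget (by simp)
  show (primes.foldl (stepB primes) (PySem.Dict.empty, [])).2 = _
  rw [B_fold primes primes PySem.Dict.empty [] hempty]
  simp

-- ===== VERDICT (by name: the statement is the Claim_ definition above) =====
theorem get_circular_primes_spec : Claim_equal_get_circular_primes := by
  intro primes _ _
  unfold Spec_get_circular_primes
  rw [A_eq_filter, B_eq_filter]
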